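-- pv_equiv track=rewrite | github.com/doyon33/coding_test | 220124.py | calculate
-- ===== SOURCE A (Python) =====
-- def calculate(n):
--   result = 0
--   i = 0
--   for i in range(len(n)):
--     if n[i] == 0:
--       result += 4
--     elif n[i] == 1:
--       result += 2
--     else:
--       result += 3
--     i += 1
--   space = len(n) + 2
--   return (result + space)
-- ===== SOURCE B (Python) =====
-- def calculate(n):
--   return 4 * len(n) + 2 + n.count(0) - n.count(1)
-- ===== Notes on version B (the rewrite author's own statement) =====
-- stated objective: simpler
-- what changed: Replaced the index loop with branches by a single closed-form expression 4*len(n)+2+n.count(0)-n.count(1).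
import Mathlib
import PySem

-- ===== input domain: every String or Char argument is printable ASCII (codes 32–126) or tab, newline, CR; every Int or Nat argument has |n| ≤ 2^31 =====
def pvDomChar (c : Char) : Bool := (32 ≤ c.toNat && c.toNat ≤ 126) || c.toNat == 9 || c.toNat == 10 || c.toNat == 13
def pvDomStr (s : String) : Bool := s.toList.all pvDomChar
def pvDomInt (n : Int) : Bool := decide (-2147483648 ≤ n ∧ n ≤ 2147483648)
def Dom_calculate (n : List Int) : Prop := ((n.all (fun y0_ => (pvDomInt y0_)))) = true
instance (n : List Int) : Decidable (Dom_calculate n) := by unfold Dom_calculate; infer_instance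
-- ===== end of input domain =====

-- B replaces the branching index loop by the closed form 4*len(n)+2+count(0)-count(1) (simpler).


-- ===== PORT A =====
-- for i in range(len(n)): branch on n[i]; indices are always in range, so pyGetD with default 0 is exact.
-- (the Python's 'i += 1' inside the loop is dead: the for-statement reassigns i.)
def calculate (n : List Int) : Int :=
  let result : Int :=
    (PySem.List.pyRange 0 (n.length : Int) 1).foldl
      (fun result i =>
        let x := PySem.List.pyGetD n i 0
        if x = 0 then result + 4
        else if x = 1 then result + 2
        else result + 3) 0
  let space : Int := (n.length : Int) + 2
  result + space

-- ===== PORT B =====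
def calculate_alt (n : List Int) : Int :=
  4 * (n.length : Int) + 2 + (PySem.List.count n 0 : Int) - (PySem.List.count n 1 : Int)

-- ===== PRECONDITION & SPEC =====
def Spec_calculate (n : List Int) (out : Int) : Prop := out = calculate_alt n
instance (n : List Int) (out : Int) : Decidable (Spec_calculate n out) := by unfold Spec_calculate; infer_instance

-- ===== CLAIM (what is proved, stated in full; the proofs are below) =====
def Claim_equal_calculate : Prop := ∀ (n : List Int), Dom_calculate n → Spec_calculate n (calculate n)

-- ===== LEMMAS AND PROOFS =====
theorem calc_foldl_closed (n : List Int) (r : Int) :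
    n.foldl (fun result x =>
        if x = 0 then result + 4
        else if x = 1 then result + 2
        else result + 3) r
      = r + 3 * (n.length : Int) + (n.count 0 : Int) - (n.count 1 : Int) := by
  induction n generalizing r with
  | nil => simp
  | cons a t ih =>
    simp only [List.foldl_cons, ih, List.count_cons, List.length_cons]
    by_cases h0 : a = 0
    · simp [h0]; ring
    · by_cases h1 : a = 1
      · simp [h1]; ring
      · simp [h0, h1, Ne.symm h0, Ne.symm h1]
        ring

-- ===== VERDICT (by name: the statement is the Claim_ definition above) =====
theorem calculate_spec : Claim_equal_calculate := by
  intro n _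
  unfold Spec_calculate calculate calculate_alt
  rw [PySem.List.foldl_pyRange_zero_pyGetD' n 0
      (fun result x =>
        if x = 0 then result + 4
        else if x = 1 then result + 2
        else result + 3) 0]
  rw [calc_foldl_closed]
  simp [PySem.List.count]
  ring
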